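-- pv_equiv track=rewrite | github.com/liupengsay/PyIsTheBestLang | src/dp/tree_dp/problem.py | lc_2673
-- ===== SOURCE A (Python) =====
-- from typing import List, Optional
--
-- def lc_2673(n: int, cost: List[int]) -> int:
--     """
--     url: https://leetcode.cn/problems/make-costs-of-paths-equal-in-a-binary-tree/
--     tag: tree_dp|greedy
--     """
--     # tree_dpgreedy
--     ans = 0
--     for i in range(n // 2, 0, -1):
--         left = cost[i * 2 - 1]
--         right = cost[i * 2]
--         if left > right:
--             cost[i - 1] += left
--             ans += left - right
--         else:
--             cost[i - 1] += right
--             ans += right - left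
--     return ans
-- ===== SOURCE B (Python) =====
-- def lc_2673(n, cost):
--     # Pure post-order DFS over the implicit binary tree (node i, children 2i, 2i+1);
--     # dfs returns (root-to-leaf path value of the subtree, extra cost needed in it).
--     # Does not mutate cost (A does); the return value is identical.
--     def dfs(i):
--         v = cost[i - 1]
--         if 2 * i <= n:
--             left, el = dfs(2 * i)
--             right, er = dfs(2 * i + 1)
--             return v + max(left, right), el + er + abs(left - right)
--         return v, 0
--     return dfs(1)[1] if n >= 2 else 0
-- ===== Notes on version B (the rewrite author's own statement) =====
-- stated objective: alternative
-- what changed: Replaces the descending index loop that mutates cost in place with a pure post-order recursive DFS over the implicit binary tree (node i, children 2i and 2i+1) returning (subtree path value, extra cost) pairs; B does not mutate its argument, the equivalence is about the return value.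
import Mathlib
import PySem

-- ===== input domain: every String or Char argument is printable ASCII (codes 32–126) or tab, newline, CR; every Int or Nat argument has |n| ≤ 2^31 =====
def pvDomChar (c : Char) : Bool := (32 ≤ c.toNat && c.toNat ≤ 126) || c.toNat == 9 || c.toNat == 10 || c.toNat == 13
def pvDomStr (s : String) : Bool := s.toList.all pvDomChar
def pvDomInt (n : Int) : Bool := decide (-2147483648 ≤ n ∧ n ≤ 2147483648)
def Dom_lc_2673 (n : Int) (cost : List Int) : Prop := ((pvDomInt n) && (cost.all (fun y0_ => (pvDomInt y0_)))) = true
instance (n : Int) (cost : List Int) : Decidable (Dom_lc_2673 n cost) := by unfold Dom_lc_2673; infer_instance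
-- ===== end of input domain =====

-- B replaces A's descending index loop (which mutates cost in place) by a pure
-- post-order recursive DFS over the implicit binary tree; return values agree,
-- B performs no mutation (A mutates cost; equivalence is about the return value).

-- ===== PORT A =====
-- A's loop 'for i in range(n // 2, 0, -1)' over mutable state (cost, ans).
-- cost[i*2-1] / cost[i*2] / cost[i-1] are pyGet? (none = IndexError → whole result none,
-- excluded by Pre_); the write 'cost[i-1] += …' is pySetD, exact here because the read
-- of cost[i-1] at the same index succeeded.
def lc2673Loop : List Int → List Int → Int → Option (List Int × Int)
  | [], cost, ans => some (cost, ans)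
  | i :: rest, cost, ans =>
    match PySem.List.pyGet? cost (i * 2 - 1), PySem.List.pyGet? cost (i * 2),
          PySem.List.pyGet? cost (i - 1) with
    | some left, some right, some cur =>
      if left > right then
        lc2673Loop rest (PySem.List.pySetD cost (i - 1) (cur + left)) (ans + (left - right))
      else
        lc2673Loop rest (PySem.List.pySetD cost (i - 1) (cur + right)) (ans + (right - left))
    | _, _, _ => none

-- getD 0 is only reached when the loop hit an IndexError (excluded by Pre_lc_2673)
def lc_2673 (n : Int) (cost : List Int) : Int :=
  ((lc2673Loop (PySem.List.pyRange (PySem.Int.floordiv n 2) 0 (-1)) cost 0).map Prod.snd).getD 0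

-- ===== PORT B =====
-- Source B's dfs(i): value = cost[i-1]; internal node (2*i <= n) recurses on 2i, 2i+1.
-- fuel only guards termination (the recursion depth from node 1 is at most log2 n + 2,
-- and the port supplies fuel n.toNat + 1, which always suffices); none = IndexError.
def lc2673Dfs (n : Int) (cost : List Int) : Nat → Int → Option (Int × Int)
  | 0, _ => none
  | fuel + 1, i =>
    match PySem.List.pyGet? cost (i - 1) with
    | none => none
    | some v =>
      if 2 * i ≤ n then
        match lc2673Dfs n cost fuel (2 * i), lc2673Dfs n cost fuel (2 * i + 1) with
        | some (l, el), some (r, er) => some (v + max l r, el + er + |l - r|)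
        | _, _ => none
      else some (v, 0)

def lc_2673_alt (n : Int) (cost : List Int) : Int :=
  if n ≥ 2 then ((lc2673Dfs n cost (n.toNat + 1) 1).map Prod.snd).getD 0 else 0

-- ===== PRECONDITION & SPEC =====
-- Pre_ excludes exactly the inputs on which A raises IndexError: when the loop runs
-- (n ≥ 2) its first iteration reads cost[2*(n//2)], so the list must be longer than that.
def Pre_lc_2673 (n : Int) (cost : List Int) : Prop :=
  n < 2 ∨ 2 * PySem.Int.floordiv n 2 < (cost.length : Int)
instance (n : Int) (cost : List Int) : Decidable (Pre_lc_2673 n cost) := by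
  unfold Pre_lc_2673; infer_instance

def pvWitness_lc_2673 : Int × List Int := (3, [1, 5, 3])

def Spec_lc_2673 (n : Int) (cost : List Int) (out : Int) : Prop := out = lc_2673_alt n cost
instance (n : Int) (cost : List Int) (out : Int) : Decidable (Spec_lc_2673 n cost out) := by
  unfold Spec_lc_2673; infer_instance

-- ===== CLAIM (what is proved, stated in full; the proofs are below) =====
def Claim_equal_lc_2673 : Prop := ∀ (n : Int) (cost : List Int), Dom_lc_2673 n cost → Pre_lc_2673 n cost → Spec_lc_2673 n cost (lc_2673 n cost)

-- ===== LEMMAS AND PROOFS =====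

-- Final value of node j (1-indexed) in the tree with n' nodes and original costs c0.
def pvVal (n' : Nat) (c0 : List Int) (j : Nat) : Int :=
  if h : 1 ≤ j ∧ 2 * j ≤ n' then
    c0.getD (j - 1) 0 + max (pvVal n' c0 (2 * j)) (pvVal n' c0 (2 * j + 1))
  else c0.getD (j - 1) 0
termination_by n' + 1 - j
decreasing_by all_goals omega

-- Cost added at internal node j.
def pvD (n' : Nat) (c0 : List Int) (j : Nat) : Int :=
  |pvVal n' c0 (2 * j) - pvVal n' c0 (2 * j + 1)|

-- is i an ancestor-or-self of j in the implicit binary tree?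
def pvAnc (i : Nat) : Nat → Bool
  | j => if j < i then false else if j = i then true else pvAnc i (j / 2)
termination_by j => j
decreasing_by exact Nat.div_lt_self (by omega) (by omega)

-- Sum of pvD over internal nodes in the subtree of i.
def pvS (n' : Nat) (c0 : List Int) (i : Nat) : Int :=
  ∑ j ∈ Finset.Icc 1 (n' / 2), if pvAnc i j then pvD n' c0 j else 0

-- Flat sum pvD 1 + … + pvD k (in A's accumulation grouping).
def pvAsum (n' : Nat) (c0 : List Int) : Nat → Int
  | 0 => 0
  | k + 1 => pvD n' c0 (k + 1) + pvAsum n' c0 k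

theorem pvVal_leaf (n' : Nat) (c0 : List Int) (j : Nat) (h : ¬(1 ≤ j ∧ 2 * j ≤ n')) :
    pvVal n' c0 j = c0.getD (j - 1) 0 := by
  rw [pvVal]; simp [h]

theorem pvVal_internal (n' : Nat) (c0 : List Int) (j : Nat) (h1 : 1 ≤ j) (h2 : 2 * j ≤ n') :
    pvVal n' c0 j = c0.getD (j - 1) 0 + max (pvVal n' c0 (2 * j)) (pvVal n' c0 (2 * j + 1)) := by
  rw [pvVal]; simp [h1, h2]

theorem pvAnc_self (i : Nat) : pvAnc i i = true := by
  rw [pvAnc]; simp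

theorem pvAnc_ge (i : Nat) : ∀ j, pvAnc i j = true → i ≤ j := by
  intro j
  induction j using Nat.strong_induction_on with
  | _ j ih =>
    rw [pvAnc]
    split
    · simp
    · split
      · omega
      · intro h; omega

theorem pvAnc_one (j : Nat) (hj : 1 ≤ j) : pvAnc 1 j = true := by
  induction j using Nat.strong_induction_on with
  | _ j ih =>
    rw [pvAnc]
    split
    · omega
    · split
      · rfl
      · exact ih (j / 2) (Nat.div_lt_self (by omega) (by omega)) (by omega)

theorem pvAnc_child (i : Nat) (hi : 1 ≤ i) (c : Nat) (hc : c = 2 * i ∨ c = 2 * i + 1) :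
    ∀ j, pvAnc c j = true → pvAnc i j = true := by
  intro j
  induction j using Nat.strong_induction_on with
  | _ j ih =>
    intro h
    have hcj : c ≤ j := pvAnc_ge c j h
    rw [pvAnc]
    have hij : i < j := by omega
    simp only [if_neg (by omega : ¬ j < i), if_neg (by omega : ¬ j = i)]
    rw [pvAnc] at h
    split at h
    · exact absurd h (by simp)
    · split at h
      · -- j = c, so j / 2 = i
        have : j / 2 = i := by omega
        rw [this, pvAnc_self]
      · exact ih (j / 2) (Nat.div_lt_self (by omega) (by omega)) h

theorem pvAnc_lt (i j : Nat) (h : j < i) : pvAnc i j = false := by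
  rw [pvAnc]; simp [h]

theorem pvAnc_step (i j : Nat) (h : i < j) : pvAnc i j = pvAnc i (j / 2) := by
  rw [pvAnc]
  simp only [if_neg (by omega : ¬ j < i), if_neg (by omega : ¬ j = i)]

theorem pvAnc_split (i : Nat) (hi : 1 ≤ i) : ∀ j, pvAnc i j = true → j ≠ i →
    (pvAnc (2 * i) j = true ∧ pvAnc (2 * i + 1) j = false) ∨
    (pvAnc (2 * i) j = false ∧ pvAnc (2 * i + 1) j = true) := by
  intro j
  induction j using Nat.strong_induction_on with
  | _ j ih =>
    intro h hne
    have hij : i ≤ j := pvAnc_ge i j h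
    have hij' : i < j := by omega
    rw [pvAnc_step i j hij'] at h
    by_cases hji : j / 2 = i
    · have hcase : j = 2 * i ∨ j = 2 * i + 1 := by omega
      rcases hcase with hj | hj
      · left
        refine ⟨by rw [hj]; exact pvAnc_self _, ?_⟩
        rw [hj]; exact pvAnc_lt _ _ (by omega)
      · right
        refine ⟨?_, by rw [hj]; exact pvAnc_self _⟩
        rw [hj, pvAnc_step (2 * i) (2 * i + 1) (by omega)]
        have h2 : (2 * i + 1) / 2 = i := by omega
        rw [h2]; exact pvAnc_lt _ _ (by omega)
    · have hrec := ih (j / 2) (Nat.div_lt_self (by omega) (by omega)) h hji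
      have hge2 : i ≤ j / 2 := pvAnc_ge i (j / 2) h
      have hj2 : 2 * i + 1 < j := by omega
      rw [pvAnc_step (2 * i) j (by omega), pvAnc_step (2 * i + 1) j (by omega)]
      exact hrec

theorem pvAsum_eq_sum (n' : Nat) (c0 : List Int) (k : Nat) :
    pvAsum n' c0 k = ∑ j ∈ Finset.Icc 1 k, pvD n' c0 j := by
  induction k with
  | zero => simp [pvAsum]
  | succ k ih =>
    rw [Finset.sum_Icc_succ_top (by omega)]
    simp [pvAsum, ih]; ring

theorem pvS_leaf (n' : Nat) (c0 : List Int) (i : Nat) (hi : n' / 2 < i) :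
    pvS n' c0 i = 0 := by
  apply Finset.sum_eq_zero
  intro j hj
  rw [Finset.mem_Icc] at hj
  rw [pvAnc_lt i j (by omega)]
  simp

theorem pvS_internal (n' : Nat) (c0 : List Int) (i : Nat) (hi : 1 ≤ i) (him : i ≤ n' / 2) :
    pvS n' c0 i = pvD n' c0 i + pvS n' c0 (2 * i) + pvS n' c0 (2 * i + 1) := by
  unfold pvS
  have hmem : i ∈ Finset.Icc 1 (n' / 2) := Finset.mem_Icc.mpr ⟨hi, him⟩
  have hD : pvD n' c0 i = ∑ j ∈ Finset.Icc 1 (n' / 2), if j = i then pvD n' c0 j else 0 := by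
    rw [Finset.sum_ite_eq' (Finset.Icc 1 (n' / 2)) i (fun j => pvD n' c0 j), if_pos hmem]
  rw [hD, ← Finset.sum_add_distrib, ← Finset.sum_add_distrib]
  apply Finset.sum_congr rfl
  intro j hj
  by_cases hji : j = i
  · subst hji
    rw [pvAnc_self, pvAnc_lt (2 * j) j (by omega), pvAnc_lt (2 * j + 1) j (by omega)]
    simp
  · by_cases ha : pvAnc i j = true
    · rcases pvAnc_split i hi j ha hji with ⟨h1, h2⟩ | ⟨h1, h2⟩ <;> simp [ha, h1, h2, hji]
    · have hb : pvAnc (2 * i) j = false := by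
        cases heq : pvAnc (2 * i) j
        · rfl
        · exact absurd (pvAnc_child i hi (2 * i) (Or.inl rfl) j heq) ha
      have hc : pvAnc (2 * i + 1) j = false := by
        cases heq : pvAnc (2 * i + 1) j
        · rfl
        · exact absurd (pvAnc_child i hi (2 * i + 1) (Or.inr rfl) j heq) ha
      simp [ha, hb, hc, hji]

theorem pvS_one (n' : Nat) (c0 : List Int) : pvS n' c0 1 = pvAsum n' c0 (n' / 2) := by
  rw [pvAsum_eq_sum]
  apply Finset.sum_congr rfl
  intro j hj
  rw [Finset.mem_Icc] at hj
  rw [pvAnc_one j (by omega)]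
  simp

theorem dfs_eq (n : Int) (c0 : List Int) (hn : 2 ≤ n) (hL : 2 * (n.toNat / 2) < c0.length) :
    ∀ (fuel : Nat) (j : Nat), 1 ≤ j → j ≤ 2 * (n.toNat / 2) + 1 → n.toNat + 1 < fuel + j →
    lc2673Dfs n c0 fuel (j : Int) = some (pvVal n.toNat c0 j, pvS n.toNat c0 j) := by
  intro fuel
  induction fuel with
  | zero =>
    intro j h1 h2 h3
    exfalso; omega
  | succ fuel ih =>
    intro j h1 h2 h3
    have hj1 : ((j : Int) - 1) = ((j - 1 : Nat) : Int) := by push_cast [h1]; ring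
    have hlt : j - 1 < c0.length := by omega
    have hget : PySem.List.pyGet? c0 ((j : Int) - 1) = some c0[j - 1] := by
      rw [hj1, PySem.List.pyGet?_natCast, List.getElem?_eq_getElem hlt]
    have hgetD : c0.getD (j - 1) 0 = c0[j - 1] := List.getD_eq_getElem c0 0 hlt
    have hn' : n = (n.toNat : Int) := by omega
    by_cases hcond : 2 * j ≤ n.toNat
    · have hcondI : 2 * (j : Int) ≤ n := by omega
      have hjm : j ≤ n.toNat / 2 := by omega
      have e1 : (2 * (j : Int)) = ((2 * j : Nat) : Int) := by push_cast; ring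
      have e2 : (2 * (j : Int) + 1) = ((2 * j + 1 : Nat) : Int) := by push_cast; ring
      have hl := ih (2 * j) (by omega) (by omega) (by omega)
      have hr := ih (2 * j + 1) (by omega) (by omega) (by omega)
      simp only [lc2673Dfs, hget]
      rw [if_pos hcondI, e2, e1, hl, hr]
      rw [pvVal_internal n.toNat c0 j h1 hcond, pvS_internal n.toNat c0 j h1 hjm, hgetD]
      have hd : pvD n.toNat c0 j = |pvVal n.toNat c0 (2 * j) - pvVal n.toNat c0 (2 * j + 1)| := rfl
      rw [hd]
      simp only [Option.some.injEq, Prod.mk.injEq]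
      exact ⟨trivial, by ring⟩
    · have hcondI : ¬ (2 * (j : Int) ≤ n) := by omega
      simp only [lc2673Dfs, hget, if_neg hcondI]
      rw [pvVal_leaf n.toNat c0 j (by omega), pvS_leaf n.toNat c0 j (by omega), hgetD]

theorem loop_eq (n' : Nat) (c0 : List Int) (hL : 2 * (n' / 2) < c0.length) :
    ∀ (k : Nat) (c : List Int) (a : Int), k ≤ n' / 2 → c.length = c0.length →
    (∀ p : Nat, p < c0.length →
      c.getD p 0 = if p < k then c0.getD p 0 else pvVal n' c0 (p + 1)) →
    ∃ cf, lc2673Loop (PySem.List.pyRange (k : Int) 0 (-1)) c a = some (cf, a + pvAsum n' c0 k) := by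
  intro k
  induction k with
  | zero =>
    intro c a _ _ _
    rw [PySem.List.pyRange_neg_one_eq_nil (by omega)]
    exact ⟨c, by simp [lc2673Loop, pvAsum]⟩
  | succ k ih =>
    intro c a hk hlen hc
    rw [PySem.List.pyRange_neg_one_cons (by omega : (0:Int) < ((k+1 : Nat) : Int))]
    simp only [lc2673Loop]
    -- the three indices read in this iteration
    have e1 : ((k + 1 : Nat) : Int) * 2 - 1 = ((2 * k + 1 : Nat) : Int) := by push_cast; ring
    have e2 : ((k + 1 : Nat) : Int) * 2 = ((2 * k + 2 : Nat) : Int) := by push_cast; ring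
    have e3 : ((k + 1 : Nat) : Int) - 1 = ((k : Nat) : Int) := by push_cast; ring
    have hb1 : 2 * k + 1 < c.length := by omega
    have hb2 : 2 * k + 2 < c.length := by omega
    have hb3 : k < c.length := by omega
    have g1 : PySem.List.pyGet? c (((k + 1 : Nat) : Int) * 2 - 1) = some (c.getD (2 * k + 1) 0) := by
      rw [e1, PySem.List.pyGet?_natCast, List.getElem?_eq_getElem hb1, List.getD_eq_getElem c 0 hb1]
    have g2 : PySem.List.pyGet? c (((k + 1 : Nat) : Int) * 2) = some (c.getD (2 * k + 2) 0) := by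
      rw [e2, PySem.List.pyGet?_natCast, List.getElem?_eq_getElem hb2, List.getD_eq_getElem c 0 hb2]
    have g3 : PySem.List.pyGet? c (((k + 1 : Nat) : Int) - 1) = some (c.getD k 0) := by
      rw [e3, PySem.List.pyGet?_natCast, List.getElem?_eq_getElem hb3, List.getD_eq_getElem c 0 hb3]
    have v1 : c.getD (2 * k + 1) 0 = pvVal n' c0 (2 * (k + 1)) := by
      rw [hc (2 * k + 1) (by omega), if_neg (by omega)]
      congr 1
    have v2 : c.getD (2 * k + 2) 0 = pvVal n' c0 (2 * (k + 1) + 1) := by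
      rw [hc (2 * k + 2) (by omega), if_neg (by omega)]
      congr 1
    have v3 : c.getD k 0 = c0.getD k 0 := by
      rw [hc k (by omega), if_pos (by omega)]
    have hval : pvVal n' c0 (k + 1) =
        c0.getD k 0 + max (pvVal n' c0 (2 * (k + 1))) (pvVal n' c0 (2 * (k + 1) + 1)) := by
      rw [pvVal_internal n' c0 (k + 1) (by omega) (by omega)]
      simp
    have hrange : (((k + 1 : Nat) : Int)) - 1 = ((k : Nat) : Int) := e3
    -- the next state after writing cost[k]
    have hsetD : ∀ v : Int, PySem.List.pySetD c (((k + 1 : Nat) : Int) - 1) v = c.set k v := by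
      intro v; rw [e3, PySem.List.pySetD_natCast]
    have hinv : ∀ v : Int, v = pvVal n' c0 (k + 1) →
        (∀ p : Nat, p < c0.length →
          (c.set k v).getD p 0 = if p < k then c0.getD p 0 else pvVal n' c0 (p + 1)) := by
      intro v hv p hp
      by_cases hpk : p = k
      · subst hpk
        rw [List.getD_eq_getElem _ 0 (by rw [List.length_set]; omega),
          List.getElem_set_self (by simp only [List.length_set]; omega)]
        rw [if_neg (by omega), hv]
      · have : (c.set k v).getD p 0 = c.getD p 0 := by
          by_cases hp' : p < c.length
          · rw [List.getD_eq_getElem _ 0 (by rw [List.length_set]; omega),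
              List.getD_eq_getElem c 0 hp', List.getElem_set_ne (by omega)]
          · rw [List.getD_eq_default _ 0 (by rw [List.length_set]; omega),
              List.getD_eq_default c 0 (by omega)]
        rw [this, hc p hp]
        by_cases h' : p < k
        · rw [if_pos h', if_pos (by omega)]
        · rw [if_neg h', if_neg (by omega)]
    have habs : pvD n' c0 (k + 1) =
        |pvVal n' c0 (2 * (k + 1)) - pvVal n' c0 (2 * (k + 1) + 1)| := rfl
    simp only [g1, g2, g3, v1, v2, v3]
    by_cases hlr : pvVal n' c0 (2 * (k + 1)) > pvVal n' c0 (2 * (k + 1) + 1)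
    · rw [if_pos hlr, hsetD, e3]
      obtain ⟨cf, hcf⟩ := ih (c.set k (c0.getD k 0 + pvVal n' c0 (2 * (k + 1))))
        (a + (pvVal n' c0 (2 * (k + 1)) - pvVal n' c0 (2 * (k + 1) + 1)))
        (by omega) (by simp [hlen])
        (hinv _ (by rw [hval, max_eq_left (le_of_lt hlr)]))
      refine ⟨cf, ?_⟩
      rw [hcf]
      have : pvD n' c0 (k + 1) = pvVal n' c0 (2 * (k + 1)) - pvVal n' c0 (2 * (k + 1) + 1) := by
        rw [habs, abs_of_pos (by omega)]
      simp only [pvAsum, this]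
      rw [add_assoc]
    · rw [if_neg hlr, hsetD, e3]
      obtain ⟨cf, hcf⟩ := ih (c.set k (c0.getD k 0 + pvVal n' c0 (2 * (k + 1) + 1)))
        (a + (pvVal n' c0 (2 * (k + 1) + 1) - pvVal n' c0 (2 * (k + 1))))
        (by omega) (by simp [hlen])
        (hinv _ (by rw [hval, max_eq_right (by omega)]))
      refine ⟨cf, ?_⟩
      rw [hcf]
      have : pvD n' c0 (k + 1) = pvVal n' c0 (2 * (k + 1) + 1) - pvVal n' c0 (2 * (k + 1)) := by
        rw [habs, abs_of_nonpos (by omega), neg_sub]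
      simp only [pvAsum, this]
      rw [add_assoc]

theorem lc_2673_spec : Claim_equal_lc_2673 := by
  intro n cost _ hpre
  unfold Spec_lc_2673 lc_2673 lc_2673_alt
  by_cases hn : n < 2
  · rw [if_neg (by omega)]
    have hm : PySem.Int.floordiv n 2 < 1 := by
      rw [PySem.Int.floordiv_lt_iff_lt_mul (by omega)]
      omega
    rw [PySem.List.pyRange_neg_one_eq_nil (by omega)]
    simp [lc2673Loop]
  · have hn2 : 2 ≤ n := by omega
    rw [if_pos (by omega)]
    have hnn : n = (n.toNat : Int) := by omega
    have hfd : PySem.Int.floordiv n 2 = ((n.toNat / 2 : Nat) : Int) := by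
      rw [hnn]; exact_mod_cast PySem.Int.floordiv_natCast n.toNat 2
    have hL : 2 * (n.toNat / 2) < cost.length := by
      rcases hpre with h | h
      · omega
      · rw [hfd] at h
        have := h
        push_cast at this
        omega
    have hinit : ∀ p : Nat, p < cost.length →
        cost.getD p 0 = if p < n.toNat / 2 then cost.getD p 0 else pvVal n.toNat cost (p + 1) := by
      intro p hp
      by_cases hpk : p < n.toNat / 2
      · rw [if_pos hpk]
      · rw [if_neg hpk, pvVal_leaf n.toNat cost (p + 1) (by omega)]
        simp
    obtain ⟨cf, hcf⟩ := loop_eq n.toNat cost hL (n.toNat / 2) cost 0 (le_refl _) rfl hinit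
    rw [hfd, hcf]
    have hdfs := dfs_eq n cost hn2 hL (n.toNat + 1) 1 (by omega) (by omega) (by omega)
    rw [show ((1 : Nat) : Int) = (1 : Int) from by norm_num] at hdfs
    rw [hdfs]
    simp only [Option.map_some, Option.getD_some]
    rw [pvS_one]
    ring
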